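-- pv_equiv track=rewrite | github.com/struggling-student/PythonExercises | PythonExercises/Dizionari/37/solution.py | es37
-- ===== SOURCE A (Python) =====
-- def es37(listaDizionari):
--     # devo tenere solo le chiavi che appaiono in almeno N/2 dizionari
--     # quindi per prima cosa le conto
--     N = len(listaDizionari)
--     conta = {}
--     # per ciascun dizionario e per ciascuna chiave, conto quante volte la chiave appare
--     for d in listaDizionari:
--         for k in d:
--             if k in conta:
--                 conta[k] += 1
--             else:
--                 conta[k] = 1
--     # una volta contate passo a raccogliere per ciascuna chiave che appare piu' di N/2 volte
--     # tutti i valori comuni a tutti i dizionari (unione degli insiemi di valori)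
--     diz = {}
--     for d in listaDizionari:
--         for k, v in d.items():
--             if conta[k] >= N/2:
--                 if k in diz:
--                     diz[k] = diz[k].union(v)
--                 else:
--                     diz[k] = set(v)
--     return diz
-- ===== SOURCE B (Python) =====
-- def es37(listaDizionari):
--     # Flatten-and-group-by: flatten all dicts into one (key, values) item list,
--     # list the distinct keys in first-appearance order, and for each distinct
--     # key scan the flat list once to gather its occurrences; a key is kept when
--     # it occurs in at least N/2 dicts (keys are unique within a dict, so the
--     # number of occurrences is the number of dicts containing the key), and its
--     # value is the union of the value sets of its occurrences.
--     N = len(listaDizionari)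
--     items = [kv for d in listaDizionari for kv in d.items()]
--     result = {}
--     for k in dict.fromkeys(key for key, _ in items):
--         occ = [v for key, v in items if key == k]
--         if len(occ) >= N / 2:
--             s = set()
--             for v in occ:
--                 s = s.union(v)
--             result[k] = s
--     return result
-- ===== Notes on version B (the rewrite author's own statement) =====
-- stated objective: alternative
-- what changed: B drops A's two hash-table-building scans entirely: it flattens the input into one item list, dedups the keys in first-appearance order, and for each distinct key rescans the flat list to count its occurrences and union its value sets (a group-by with per-key scans instead of incrementally maintained count/merge dicts).
import Mathlib
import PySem

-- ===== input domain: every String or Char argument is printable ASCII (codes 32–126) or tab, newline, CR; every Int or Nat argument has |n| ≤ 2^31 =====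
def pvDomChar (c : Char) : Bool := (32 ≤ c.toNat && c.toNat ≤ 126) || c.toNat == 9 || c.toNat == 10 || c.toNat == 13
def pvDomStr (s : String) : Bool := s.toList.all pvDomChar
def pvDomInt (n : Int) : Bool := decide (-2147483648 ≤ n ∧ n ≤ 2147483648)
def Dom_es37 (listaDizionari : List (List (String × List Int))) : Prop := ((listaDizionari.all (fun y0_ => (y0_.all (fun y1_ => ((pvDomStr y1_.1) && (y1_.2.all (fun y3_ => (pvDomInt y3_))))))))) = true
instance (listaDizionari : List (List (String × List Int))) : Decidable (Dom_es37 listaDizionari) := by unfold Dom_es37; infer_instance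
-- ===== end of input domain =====

-- B flattens the input into one item list and does a group-by with a per-distinct-key rescan
-- (count + union per key), instead of A's two hash-table-building scans (objective: alternative
-- algorithm; B trades A's dict maintenance for repeated scans of the flat list).


-- ===== PORT A =====
-- Each inner 'd' is a Python dict received as an association list; it is normalised with
-- PySem.Dict.ofList (duplicate keys: last value wins, first position kept), exactly as
-- Python's dict construction does.  'conta[k] >= N/2' (a float comparison) is ported as
-- '2 * conta[k] ≥ N', exact on integers; 'conta[k]' is ported as getD 0 (the key is always
-- present when it is read, so no KeyError is reachable).
def es37 (listaDizionari : List (List (String × List Int))) : List (String × List Int) :=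
  let N : Int := (listaDizionari.length : Int)
  let conta : PySem.Dict String Int :=
    listaDizionari.foldl (fun conta d =>
      ((PySem.Dict.ofList d).keys).foldl (fun conta k =>
        if conta.contains k then conta.modify k 0 (· + 1) else conta.insert k 1) conta)
      PySem.Dict.empty
  let diz : PySem.Dict String (PySem.Set Int) :=
    listaDizionari.foldl (fun diz d =>
      ((PySem.Dict.ofList d).items).foldl (fun diz kv =>
        if 2 * conta.getD kv.1 0 ≥ N then
          if diz.contains kv.1 then
            diz.insert kv.1 (PySem.Set.union (diz.getD kv.1 []) kv.2)
          else
            diz.insert kv.1 (PySem.Set.ofList kv.2)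
        else diz) diz)
      PySem.Dict.empty
  diz.items

-- ===== PORT B =====
-- 'dict.fromkeys(…)' (ordered dedup of the flattened key list) is PySem.List.dedup;
-- 'len(occ) >= N/2' is ported as '2 * len ≥ N', exact on integers; the result dict is
-- built by appending (the deduped keys are distinct, so plain append is insertion).
def es37_alt (listaDizionari : List (List (String × List Int))) : List (String × List Int) :=
  let N : Int := (listaDizionari.length : Int)
  let items : List (String × List Int) :=
    listaDizionari.flatMap (fun d => (PySem.Dict.ofList d).items)
  (PySem.List.dedup (items.map (·.1))).foldl (fun result k =>
    let occ : List (List Int) := (items.filter (fun kv => kv.1 == k)).map (·.2)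
    if 2 * (occ.length : Int) ≥ N then
      result ++ [(k, occ.foldl (fun s v => PySem.Set.union s v) ([] : PySem.Set Int))]
    else result) []

-- ===== PRECONDITION & SPEC =====
def Spec_es37 (listaDizionari : List (List (String × List Int))) (out : List (String × List Int)) : Prop := out = es37_alt listaDizionari
instance (listaDizionari : List (List (String × List Int))) (out : List (String × List Int)) : Decidable (Spec_es37 listaDizionari out) := by unfold Spec_es37; infer_instance

-- ===== CLAIM (what is proved, stated in full; the proofs are below) =====
def Claim_equal_es37 : Prop := ∀ (listaDizionari : List (List (String × List Int))), Dom_es37 listaDizionari → Spec_es37 listaDizionari (es37 listaDizionari)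


-- ===== LEMMAS AND PROOFS =====

-- A's counting step.
def kstep (c : PySem.Dict String Int) (k : String) : PySem.Dict String Int :=
  c.insert k (c.getD k 0 + 1)

-- The unconditional merge step (A's merge branch when the count test passes).
def mstep (m : PySem.Dict String (PySem.Set Int)) (kv : String × List Int) :
    PySem.Dict String (PySem.Set Int) :=
  m.insert kv.1 (PySem.Set.union (m.getD kv.1 []) kv.2)

-- All (key, value) items of the input, dict by dict.
def itemsAll (L : List (List (String × List Int))) : List (String × List Int) :=
  L.flatMap (fun d => (PySem.Dict.ofList d).items)

def contaOf (L : List (List (String × List Int))) : PySem.Dict String Int :=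
  ((itemsAll L).map (·.1)).foldl kstep PySem.Dict.empty

def mergedOf (L : List (List (String × List Int))) : PySem.Dict String (PySem.Set Int) :=
  (itemsAll L).foldl mstep PySem.Dict.empty

-- The threshold predicate, fixed once the counts are known.
def pb (L : List (List (String × List Int))) (k : String) : Bool :=
  2 * (contaOf L).getD k 0 ≥ (L.length : Int)

theorem astep_eq (c : PySem.Dict String Int) (k : String) :
    (if c.contains k then c.modify k 0 (· + 1) else c.insert k 1) = kstep c k := by
  by_cases h : c.contains k = true
  · simp [kstep, h, PySem.Dict.modify]
  · have hh : c.contains k = false := by simpa using h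
    simp [kstep, hh, PySem.Dict.getD_of_not_contains _ _ hh]

theorem bstep_eq (m : PySem.Dict String (PySem.Set Int)) (kv : String × List Int) :
    (if m.contains kv.1 then
        m.insert kv.1 (PySem.Set.union (m.getD kv.1 []) kv.2)
      else
        m.insert kv.1 (PySem.Set.ofList kv.2)) = mstep m kv := by
  by_cases h : m.contains kv.1 = true
  · simp [mstep, h]
  · have hh : m.contains kv.1 = false := by simpa using h
    have hu : PySem.Set.union ([] : PySem.Set Int) kv.2 = PySem.Set.ofList kv.2 := rfl
    simp [mstep, hh, PySem.Dict.getD_of_not_contains _ _ hh, hu]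

-- Core invariant: A's conditional merge fold is the filter of the unconditional merge fold.
theorem dizfold_filter (P : String -> Prop) [DecidablePred P] (l : List (String × List Int))
    (diz m : PySem.Dict String (PySem.Set Int))
    (hnd : m.keys.Nodup)
    (hinv : diz.items = m.items.filter (fun p => decide (P p.1))) :
    (l.foldl (fun diz kv => if P kv.1 then mstep diz kv else diz) diz).items
      = (l.foldl mstep m).items.filter (fun p => decide (P p.1)) := by
  induction l generalizing diz m with
  | nil => simpa using hinv
  | cons kv l ih =>
    have hnd' : (mstep m kv).keys.Nodup := PySem.Dict.nodup_keys_insert _ _ _ hnd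
    have hk : diz.keys = (m.items.filter (fun p => decide (P p.1))).map (·.1) := by
      show diz.items.map (·.1) = _
      rw [hinv]
    have hdnd : diz.keys.Nodup := by
      rw [hk]
      exact (List.Sublist.map (Prod.fst : String × PySem.Set Int → String) List.filter_sublist).nodup hnd
    have hqf : ∀ (w : PySem.Set Int) (p : String × PySem.Set Int),
        ((fun p : String × PySem.Set Int => decide (P p.1)) ∘
          (fun p : String × PySem.Set Int => if (p.1 == kv.1) = true then (kv.1, w) else p)) p
          = decide (P p.1) := by
      intro w p
      by_cases h : (p.1 == kv.1) = true
      · have he : p.1 = kv.1 := eq_of_beq h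
        simp [Function.comp, he]
      · simp [Function.comp, h]
    by_cases hP : P kv.1
    · have hmem : (kv.1 ∈ diz.keys) ↔ (kv.1 ∈ m.keys) := by
        rw [hk]
        show _ ↔ kv.1 ∈ m.items.map (·.1)
        simp only [List.mem_map, List.mem_filter]
        constructor
        · rintro ⟨p, ⟨hp, _⟩, hfst⟩
          exact ⟨p, hp, hfst⟩
        · rintro ⟨p, hp, hfst⟩
          exact ⟨p, ⟨hp, by rw [hfst]; exact decide_eq_true hP⟩, hfst⟩
      have hcon : diz.contains kv.1 = m.contains kv.1 := by
        rw [PySem.Dict.contains_eq_decide_mem_keys, PySem.Dict.contains_eq_decide_mem_keys]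
        exact decide_eq_decide.mpr hmem
      have hget : diz.getD kv.1 [] = m.getD kv.1 [] := by
        by_cases hkm : kv.1 ∈ m.keys
        · have hkm' : kv.1 ∈ m.items.map (·.1) := hkm
          obtain ⟨p, hp, hfst⟩ := List.mem_map.mp hkm'
          have hpm : (kv.1, p.2) ∈ m.items := by
            rw [← hfst]
            simpa using hp
          have h1 : m.getD kv.1 [] = p.2 := PySem.Dict.getD_of_mem_items _ hpm hnd []
          have hpd : (kv.1, p.2) ∈ diz.items := by
            rw [hinv, List.mem_filter]
            exact ⟨hpm, decide_eq_true hP⟩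
          have h2 : diz.getD kv.1 [] = p.2 := PySem.Dict.getD_of_mem_items _ hpd hdnd []
          rw [h1, h2]
        · have h1 : m.contains kv.1 = false := by
            rw [PySem.Dict.contains_eq_decide_mem_keys]
            simpa using hkm
          have h2 : diz.contains kv.1 = false := by
            rw [hcon]; exact h1
          rw [PySem.Dict.getD_of_not_contains _ _ h1, PySem.Dict.getD_of_not_contains _ _ h2]
      have hinv' : (mstep diz kv).items = (mstep m kv).items.filter (fun p => decide (P p.1)) := by
        show (diz.insert kv.1 (PySem.Set.union (diz.getD kv.1 []) kv.2)).items
            = (m.insert kv.1 (PySem.Set.union (m.getD kv.1 []) kv.2)).items.filter _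
        rw [hget]
        by_cases hc : m.contains kv.1 = true
        · have hcd : diz.contains kv.1 = true := by rw [hcon]; exact hc
          rw [PySem.Dict.items_insert_of_contains _ _ hcd,
              PySem.Dict.items_insert_of_contains _ _ hc,
              hinv, List.filter_map,
              List.filter_congr (fun p _ => hqf (PySem.Set.union (m.getD kv.1 []) kv.2) p)]
        · have hc' : m.contains kv.1 = false := by simpa using hc
          have hcd : diz.contains kv.1 = false := by rw [hcon]; exact hc'
          rw [PySem.Dict.items_insert_of_not_contains _ _ hcd,
              PySem.Dict.items_insert_of_not_contains _ _ hc',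
              List.filter_append, hinv]
          simp [hP]
      simpa only [List.foldl_cons, if_pos hP] using ih (mstep diz kv) (mstep m kv) hnd' hinv'
    · have hinv' : diz.items = (mstep m kv).items.filter (fun p => decide (P p.1)) := by
        show _ = (m.insert kv.1 (PySem.Set.union (m.getD kv.1 []) kv.2)).items.filter _
        by_cases hc : m.contains kv.1 = true
        · have key : ∀ p ∈ m.items.filter (fun p : String × PySem.Set Int => decide (P p.1)),
              (fun p : String × PySem.Set Int =>
                if (p.1 == kv.1) = true then (kv.1, PySem.Set.union (m.getD kv.1 []) kv.2) else p) p = p := by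
            intro p hp
            have hPp : P p.1 := of_decide_eq_true (List.mem_filter.mp hp).2
            have hne : (p.1 == kv.1) = false := by
              by_contra h
              have : (p.1 == kv.1) = true := by simpa using h
              exact hP (eq_of_beq this ▸ hPp)
            simp [hne]
          rw [PySem.Dict.items_insert_of_contains _ _ hc, List.filter_map,
              List.filter_congr (fun p _ => hqf (PySem.Set.union (m.getD kv.1 []) kv.2) p),
              List.map_congr_left key, List.map_id', hinv]
        · have hc' : m.contains kv.1 = false := by simpa using hc
          rw [PySem.Dict.items_insert_of_not_contains _ _ hc', List.filter_append, hinv]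
          simp [hP]
      simpa only [List.foldl_cons, if_neg hP] using ih diz (mstep m kv) hnd' hinv'

theorem conta_eq (L : List (List (String × List Int))) :
    (L.flatMap (fun d => (PySem.Dict.ofList d).keys)).foldl kstep PySem.Dict.empty = contaOf L := by
  unfold contaOf itemsAll
  rw [List.map_flatMap]
  rfl

-- A in canonical form: the filtered items of the unconditional merge table.
theorem a_canon (L : List (List (String × List Int))) :
    es37 L = ((mergedOf L).items).filter (fun p => pb L p.1) := by
  unfold es37
  simp only [astep_eq, bstep_eq]
  rw [← List.foldl_flatMap, ← List.foldl_flatMap, conta_eq,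
      show L.flatMap (fun d => (PySem.Dict.ofList d).items) = itemsAll L from rfl]
  rw [dizfold_filter (fun k => 2 * (contaOf L).getD k 0 ≥ (L.length : Int)) (itemsAll L)
        PySem.Dict.empty PySem.Dict.empty (by simp [PySem.Dict.keys_empty]) rfl]
  rfl

-- The count table reads off as an occurrence count of the flat key list.
theorem getD_foldl_kstep (l : List String) (c : PySem.Dict String Int) (k : String) :
    (l.foldl kstep c).getD k 0 = c.getD k 0 + ((l.filter (· == k)).length : Int) := by
  induction l generalizing c with
  | nil => simp
  | cons x l ih =>
    rw [List.foldl_cons, ih]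
    by_cases h : (x == k) = true
    · have he : k = x := (eq_of_beq h).symm
      subst he
      simp [kstep]
      omega
    · have hne : ¬ k = x := fun e => absurd (by simp [e] : (x == k) = true) h
      simp [kstep, PySem.Dict.getD_insert, hne, h]

-- The merge table reads off as a union-fold over the key's occurrences in the flat item list.
theorem getD_foldl_mstep (l : List (String × List Int)) (m : PySem.Dict String (PySem.Set Int))
    (k : String) :
    (l.foldl mstep m).getD k [] =
      ((l.filter (fun kv => kv.1 == k)).map (·.2)).foldl
        (fun s v => PySem.Set.union s v) (m.getD k []) := by
  induction l generalizing m with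
  | nil => simp
  | cons kv l ih =>
    rw [List.foldl_cons, ih]
    by_cases h : (kv.1 == k) = true
    · have he : k = kv.1 := (eq_of_beq h).symm
      simp [mstep, he]
    · have hne : ¬ k = kv.1 := fun e => absurd (by simp [e] : (kv.1 == k) = true) h
      simp [mstep, PySem.Dict.getD_insert, hne, h]

-- 'if P x: out.append(f x)' over a list is map-after-filter (Prop-test variant used by B's loop).
theorem foldl_append_if_prop {α β : Type} (P : α → Prop) [DecidablePred P] (f : α → β)
    (l : List α) (acc : List β) :
    l.foldl (fun acc x => if P x then acc ++ [f x] else acc) acc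
      = acc ++ (l.filter (fun x => decide (P x))).map f := by
  induction l generalizing acc with
  | nil => simp
  | cons x l ih => by_cases h : P x <;> simp [h, ih]

-- B in canonical form: map-after-filter over the deduped key list.
theorem b_canon (L : List (List (String × List Int))) :
    es37_alt L =
      ((PySem.Set.ofList ((itemsAll L).map (·.1))).filter (fun k =>
          decide (2 * ((((itemsAll L).filter (fun kv => kv.1 == k)).map (·.2)).length : Int)
            ≥ (L.length : Int)))).map (fun k =>
        (k, (((itemsAll L).filter (fun kv => kv.1 == k)).map (·.2)).foldl
              (fun s v => PySem.Set.union s v) ([] : PySem.Set Int))) := by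
  unfold es37_alt
  rw [show L.flatMap (fun d => (PySem.Dict.ofList d).items) = itemsAll L from rfl]
  rw [foldl_append_if_prop
        (P := fun k => 2 * ((((itemsAll L).filter (fun kv => kv.1 == k)).map (·.2)).length : Int)
          ≥ (L.length : Int))
        (f := fun k => (k, (((itemsAll L).filter (fun kv => kv.1 == k)).map (·.2)).foldl
              (fun s v => PySem.Set.union s v) ([] : PySem.Set Int)))]
  simp [PySem.List.dedup_eq_ofList]

theorem final_eq (L : List (List (String × List Int))) :
    ((mergedOf L).items).filter (fun p => pb L p.1) = es37_alt L := by
  have hmk : (mergedOf L).keys = PySem.Set.ofList ((itemsAll L).map (·.1)) := by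
    unfold mergedOf mstep
    rw [PySem.Dict.keys_foldl_insert_key]
    rfl
  have hmn : (mergedOf L).keys.Nodup := by
    unfold mergedOf mstep
    exact PySem.Dict.nodup_keys_foldl_insert_key _ _ _ _ (by simp [PySem.Dict.keys_empty])
  have hcount : ∀ k : String, (contaOf L).getD k 0
      = (((itemsAll L).map (·.1)).filter (· == k)).length := by
    intro k
    rw [show contaOf L = ((itemsAll L).map (·.1)).foldl kstep PySem.Dict.empty from rfl,
        getD_foldl_kstep]
    simp [PySem.Dict.getD_of_not_contains]
  have hlen : ∀ k : String,
      (((itemsAll L).map (·.1)).filter (· == k)).length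
        = (((itemsAll L).filter (fun kv => kv.1 == k)).map (·.2)).length := by
    intro k
    rw [List.filter_map, List.length_map, List.length_map]
    rfl
  have hmerge : ∀ k : String, (mergedOf L).getD k []
      = (((itemsAll L).filter (fun kv => kv.1 == k)).map (·.2)).foldl
          (fun s v => PySem.Set.union s v) ([] : PySem.Set Int) := by
    intro k
    rw [show mergedOf L = (itemsAll L).foldl mstep PySem.Dict.empty from rfl,
        getD_foldl_mstep]
    simp [PySem.Dict.getD_of_not_contains]
  rw [PySem.Dict.items_eq_map_keys _ hmn [], List.filter_map, b_canon, hmk]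
  congr 1
  · funext k
    simp [hmerge k]
  · apply List.filter_congr
    intro k _
    show pb L k = _
    simp only [pb, hcount k, hlen k]

-- ===== VERDICT (by name: the statement is the Claim_ definition above) =====
theorem es37_spec : Claim_equal_es37 := by
  intro L _
  unfold Spec_es37
  rw [a_canon, final_eq]
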